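-- pv_equiv track=rewrite | github.com/pypi-data/pypi-mirror-384 | packages/lcSVpy/lcsvpy-0.0.1.tar.gz/lcsvpy-0.0.1/lcSV/process.py | call_sv_samples
-- ===== SOURCE A (Python) =====
-- def call_sv_samples(samples, genotypes):
--     results = {}
--     results[(0,0)] = []
--
--     for i, g in enumerate(genotypes):
--         if g in results.keys():
--             results[g].append(samples[i])
--         else:
--             results[g] = [samples[i]]
--     return dict(sorted(results.items()))
-- ===== SOURCE B (Python) =====
-- def call_sv_samples(samples, genotypes):
--     keys = sorted(dict.fromkeys([(0, 0)] + genotypes))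
--     return {g: [s for s, h in zip(samples, genotypes) if h == g] for g in keys}
-- ===== Notes on version B (the rewrite author's own statement) =====
-- stated objective: simpler
-- what changed: Replaces the incremental membership-test dict grouping plus final item sort by: dedup-and-sort the key set once (seeding (0,0)), then build each group with a single filtering comprehension over zip(samples, genotypes).
import Mathlib
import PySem

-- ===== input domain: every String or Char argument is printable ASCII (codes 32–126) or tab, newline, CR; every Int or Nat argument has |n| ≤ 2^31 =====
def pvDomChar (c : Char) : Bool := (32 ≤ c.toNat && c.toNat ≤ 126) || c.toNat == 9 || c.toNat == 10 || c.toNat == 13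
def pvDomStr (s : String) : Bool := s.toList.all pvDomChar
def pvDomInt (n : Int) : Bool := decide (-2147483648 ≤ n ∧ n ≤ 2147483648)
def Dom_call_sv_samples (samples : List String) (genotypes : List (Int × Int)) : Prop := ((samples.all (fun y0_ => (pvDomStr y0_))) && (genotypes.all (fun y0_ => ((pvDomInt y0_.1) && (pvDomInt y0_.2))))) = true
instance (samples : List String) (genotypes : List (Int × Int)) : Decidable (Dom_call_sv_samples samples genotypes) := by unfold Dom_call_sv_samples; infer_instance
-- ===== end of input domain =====

-- B replaces A's incremental membership-test dict grouping + final item sort by a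
-- dedup-and-sort of the key set (seeding (0,0)) followed by one filtering pass per key
-- over zip(samples, genotypes): simpler, not claimed faster.


-- ===== PORT A =====
-- dict → PySem.Dict; results[g].append(x) on a present key is d.modify g [] (· ++ [x]);
-- sorted(results.items()) compares ((a,b),list) tuples: keys are distinct in a dict, so the
-- list component is never compared and sorted2 on the two key components is exact.
def call_sv_samples (samples : List String) (genotypes : List (Int × Int)) : List (Int × Int × List String) :=
  let results : PySem.Dict (Int × Int) (List String) := PySem.Dict.empty.insert (0, 0) []
  let final := (PySem.List.enumerate genotypes 0).foldl (fun d p =>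
      if d.contains p.2 then d.modify p.2 [] (fun l => l ++ [PySem.List.pyGetD samples p.1 ""])
      else d.insert p.2 [PySem.List.pyGetD samples p.1 ""]) results
  (PySem.List.sorted2 final.items (fun q => q.1.1) (fun q => q.1.2) false).map
    (fun q => (q.1.1, q.1.2, q.2))

-- ===== PORT B =====
-- dict.fromkeys-dedup → PySem.List.dedup; sorted over int pairs → sorted2 on the components.
def call_sv_samples_alt (samples : List String) (genotypes : List (Int × Int)) : List (Int × Int × List String) :=
  let keys := PySem.List.sorted2 (PySem.List.dedup ((0, 0) :: genotypes)) (fun g => g.1) (fun g => g.2) false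
  keys.map (fun g => (g.1, g.2, ((samples.zip genotypes).filter (fun p => p.2 == g)).map (fun p => p.1)))

-- ===== PRECONDITION & SPEC =====
-- A indexes samples[i] for every i < len(genotypes): it raises IndexError when samples is
-- shorter than genotypes; exactly those inputs are excluded.
def Pre_call_sv_samples (samples : List String) (genotypes : List (Int × Int)) : Prop :=
  genotypes.length ≤ samples.length
instance (samples : List String) (genotypes : List (Int × Int)) : Decidable (Pre_call_sv_samples samples genotypes) := by unfold Pre_call_sv_samples; infer_instance
def pvWitness_call_sv_samples : List String × (List (Int × Int)) := (["a", "b", "c"], [(1, 0), (0, 0)])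

def Spec_call_sv_samples (samples : List String) (genotypes : List (Int × Int)) (out : List (Int × Int × List String)) : Prop := out = call_sv_samples_alt samples genotypes
instance (samples : List String) (genotypes : List (Int × Int)) (out : List (Int × Int × List String)) : Decidable (Spec_call_sv_samples samples genotypes out) := by unfold Spec_call_sv_samples; infer_instance

-- ===== CLAIM (what is proved, stated in full; the proofs are below) =====
def Claim_equal_call_sv_samples : Prop := ∀ (samples : List String) (genotypes : List (Int × Int)), Dom_call_sv_samples samples genotypes → Pre_call_sv_samples samples genotypes → Spec_call_sv_samples samples genotypes (call_sv_samples samples genotypes)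

-- ===== LEMMAS AND PROOFS =====

theorem sorted2_eq_sorted_lex {α : Type} (xs : List α) (k1 k2 : α → Int) :
    PySem.List.sorted2 xs k1 k2 false
      = PySem.List.sorted xs (fun a => toLex (k1 a, k2 a)) false := by
  unfold PySem.List.sorted2 PySem.List.sorted
  simp only [if_neg (by simp : ¬ (false = true))]
  congr 1
  funext acc x
  congr 1
  funext a b
  rw [Bool.eq_iff_iff]
  simp only [Prod.Lex.lt_iff, ofLex_toLex, decide_eq_true_eq, Bool.or_eq_true, Bool.and_eq_true,
    Bool.not_eq_true', decide_eq_false_iff_not, not_lt]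
  omega

theorem sorted_map_eq_map_sorted {α β κ : Type} [LinearOrder κ]
    (K : List α) (f : α → β) (kf : α → κ) (kg : β → κ)
    (hinj : Function.Injective kf) (hnd : K.Nodup)
    (hcomm : ∀ a, kg (f a) = kf a) :
    PySem.List.sorted (K.map f) kg false = (PySem.List.sorted K kf false).map f := by
  apply PySem.List.sorted_eq_of_perm_of_pairwise_lt
  · exact (PySem.List.sorted_perm K kf false).map f
  · have hpw : (PySem.List.sorted K kf false).Pairwise (fun a b => kf a ≤ kf b) :=
      PySem.List.sorted_pairwise K kf
    have hnd' : (PySem.List.sorted K kf false).Nodup :=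
      (PySem.List.sorted_perm K kf false).nodup_iff.mpr hnd
    have hlt : (PySem.List.sorted K kf false).Pairwise (fun a b => kf a < kf b) := by
      refine (hpw.and hnd').imp ?_
      rintro a b ⟨hle, hne⟩
      exact lt_of_le_of_ne hle (fun h => hne (hinj h))
    rw [List.pairwise_map]
    refine hlt.imp ?_
    intro a b h
    simpa [hcomm] using h

theorem stepA_eq_modify (samples : List String)
    (d : PySem.Dict (Int × Int) (List String)) (p : Int × (Int × Int)) :
    (if d.contains p.2 then d.modify p.2 [] (fun l => l ++ [PySem.List.pyGetD samples p.1 ""])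
     else d.insert p.2 [PySem.List.pyGetD samples p.1 ""])
      = d.modify p.2 [] (fun l => l ++ [PySem.List.pyGetD samples p.1 ""]) := by
  by_cases h : d.contains p.2
  · simp [h]
  · simp only [h, if_neg, Bool.false_eq_true, not_false_iff]
    rw [PySem.Dict.modify, PySem.Dict.getD_of_not_contains d _ (by simpa using h)]
    simp

theorem values_eq (samples : List String) (k : Int × Int) :
    ∀ (gs : List (Int × Int)) (n : Nat), n + gs.length ≤ samples.length →
    ((PySem.List.enumerate gs (n : Int)).filter (fun p => p.2 == k)).map
        (fun p => PySem.List.pyGetD samples p.1 "")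
      = (((samples.drop n).zip gs).filter (fun p => p.2 == k)).map (fun p => p.1)
  | [], n, h => by simp [PySem.List.enumerate]
  | g :: gs, n, h => by
    have hn : n < samples.length := by simp at h; omega
    have hdrop : samples.drop n = samples[n] :: samples.drop (n + 1) :=
      List.drop_eq_getElem_cons hn
    have ih := values_eq samples k gs (n + 1) (by simp at h ⊢; omega)
    push_cast at ih
    have hget : PySem.List.pyGetD samples (n : Nat) "" = samples[n] := by
      rw [PySem.List.pyGetD_natCast]
      simp [List.getD_eq_getElem?_getD, hn]
    rw [PySem.List.enumerate_cons, hdrop]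
    by_cases hk : g == k
    · simp only [List.zip_cons_cons, List.filter_cons, hk, if_pos, List.map_cons, ih, hget]
    · simp only [List.zip_cons_cons, List.filter_cons, hk, Bool.false_eq_true, if_neg,
        not_false_iff, ih]

theorem call_sv_samples_ab (samples : List String) (genotypes : List (Int × Int))
    (hpre : genotypes.length ≤ samples.length) :
    call_sv_samples samples genotypes = call_sv_samples_alt samples genotypes := by
  unfold call_sv_samples call_sv_samples_alt
  simp only [stepA_eq_modify samples]
  -- turn the enumerate-fold into a pairs-fold
  have hfold :
      (PySem.List.enumerate genotypes 0).foldl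
          (fun d p => d.modify p.2 [] (fun l => l ++ [PySem.List.pyGetD samples p.1 ""]))
          (PySem.Dict.empty.insert (0, 0) [])
        = (((PySem.List.enumerate genotypes 0).map
              (fun p => (p.2, PySem.List.pyGetD samples p.1 ""))).foldl
            (fun d q => d.modify q.1 [] (fun l => l ++ [q.2]))
            (PySem.Dict.empty.insert (0, 0) [])) := by
    rw [List.foldl_map]
  rw [hfold]
  set pairs := (PySem.List.enumerate genotypes 0).map
      (fun p => (p.2, PySem.List.pyGetD samples p.1 "")) with hpairs
  set F := pairs.foldl (fun d q => d.modify q.1 [] (fun l => l ++ [q.2]))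
      (PySem.Dict.empty.insert ((0:Int), (0:Int)) ([] : List String)) with hF
  have hpfst : pairs.map (fun q => q.1) = genotypes := by
    rw [hpairs, List.map_map]
    exact PySem.List.map_snd_enumerate genotypes 0
  have hkeys : F.keys = PySem.Set.update [((0:Int),(0:Int))] genotypes := by
    rw [hF, PySem.Dict.keys_foldl_modify_key pairs (fun q => q.1) []
      (fun _ q => (fun l => l ++ [q.2]))]
    · rw [hpfst]
      rfl
  have hdedup : PySem.List.dedup (((0:Int),(0:Int)) :: genotypes)
      = PySem.Set.update [((0:Int),(0:Int))] genotypes := by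
    rw [PySem.List.dedup_eq_ofList]
    rfl
  have hnodK : (PySem.Set.update [((0:Int),(0:Int))] genotypes).Nodup := by
    rw [← hdedup, PySem.List.dedup_eq_ofList]
    exact PySem.Set.nodup_ofList _
  have hval : ∀ c, F.getD c [] = (pairs.filter (fun q => q.1 == c)).map (fun q => q.2) := by
    intro c
    rw [hF, PySem.Dict.getD_foldl_modify_append]
    rw [PySem.Dict.getD_insert]
    split <;> simp
  have hitems : F.items = (PySem.Set.update [((0:Int),(0:Int))] genotypes).map
      (fun k => (k, (pairs.filter (fun q => q.1 == k)).map (fun q => q.2))) := by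
    rw [PySem.Dict.items_eq_map_keys F (by rw [hkeys]; exact hnodK) [], hkeys]
    exact List.map_congr_left (fun k _ => by rw [hval k])
  rw [hitems, hdedup]
  rw [sorted2_eq_sorted_lex, sorted2_eq_sorted_lex]
  rw [sorted_map_eq_map_sorted (PySem.Set.update [((0:Int),(0:Int))] genotypes)
      (fun k => (k, (pairs.filter (fun q => q.1 == k)).map (fun q => q.2)))
      (fun g => toLex (g.1, g.2)) (fun q => toLex (q.1.1, q.1.2))
      (fun a b h => by
        have h2 : ((a.1, a.2) : Int × Int) = (b.1, b.2) := by
          simpa using congrArg ofLex h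
        exact Prod.ext (congrArg Prod.fst h2) (congrArg Prod.snd h2))
      hnodK (fun a => rfl)]
  rw [List.map_map]
  refine List.map_congr_left ?_
  intro k hk
  simp only [Function.comp]
  congr 1
  congr 1
  -- values: pairs-filter vs zip-filter
  rw [hpairs, List.filter_map, List.map_map]
  have := values_eq samples k genotypes 0 (by simpa using hpre)
  simp only [Nat.cast_zero, List.drop_zero] at this
  rw [← this]
  rfl

-- ===== VERDICT (by name: the statement is the Claim_ definition above) =====
theorem call_sv_samples_spec : Claim_equal_call_sv_samples := by
  intro samples genotypes _ hpre
  exact call_sv_samples_ab samples genotypes hpre
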